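-- pv_equiv track=rewrite | github.com/AndresAp01/Taller_de_Programacion | sem9_intro.py | Operar_For_i
-- ===== SOURCE A (Python) =====
-- def Operar_For_i(lista):
--     if type(lista)!=list or len(lista)==0:
--         return"Error"
--     resultado=[0]*len(lista)
--     i=0
--     for x in lista:
--         indice_0=i%len(lista)
--         indice_2=(i+2)%len(lista)
--         indice_4=(i+4)%len(lista)
--
--         resultado[i]=lista[indice_0]+lista[indice_2]-lista[indice_4]
--         i+=1
--     return resultado
-- ===== SOURCE B (Python) =====
-- def Operar_For_i(lista):
--     if type(lista) != list or len(lista) == 0: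
--         return "Error"
--     n = len(lista)
--     s2 = 2 % n
--     s4 = 4 % n
--     rot2 = lista[s2:] + lista[:s2]
--     rot4 = lista[s4:] + lista[:s4]
--     return [a + b - c for a, b, c in zip(lista, rot2, rot4)]
-- ===== Notes on version B (the rewrite author's own statement) =====
-- stated objective: faster
-- what changed: Replaces A's counter loop with per-index modular arithmetic writing into a preallocated result by building two precomputed rotations (slices lista[k%n:]+lista[:k%n]) and combining the three aligned sequences in a single zip comprehension.
-- outside the precondition, e.g. on Operar_For_i([]): A returns 'Error', B returns 'Error'
import Mathlib
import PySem

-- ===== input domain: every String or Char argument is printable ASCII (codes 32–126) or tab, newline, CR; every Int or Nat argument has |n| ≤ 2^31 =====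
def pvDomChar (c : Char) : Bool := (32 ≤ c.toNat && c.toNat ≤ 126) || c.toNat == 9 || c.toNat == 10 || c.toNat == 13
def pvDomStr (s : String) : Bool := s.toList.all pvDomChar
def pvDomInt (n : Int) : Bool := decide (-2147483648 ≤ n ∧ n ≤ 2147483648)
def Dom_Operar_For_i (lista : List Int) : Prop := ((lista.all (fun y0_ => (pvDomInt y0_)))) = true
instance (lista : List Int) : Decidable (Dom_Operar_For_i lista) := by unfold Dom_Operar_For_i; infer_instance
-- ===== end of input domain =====

-- B replaces A's per-index modular arithmetic by two precomputed rotations combined in one zip pass (a timing run measured B faster by a constant factor).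

-- ===== PORT A =====
-- loop 'for x in lista' with counter i, writing resultado[i]; the indices i%n, (i+2)%n, (i+4)%n
-- are always in [0,n), so lista.getD · 0 is exact for Python's lista[indice].
def Operar_For_i (lista : List Int) : List Int :=
  -- on an empty list Python A returns the string "Error" (not a list of ints): excluded by Pre_
  let n := lista.length
  ((lista.foldl (fun (st : List Int × Nat) _x =>
      let i := st.2
      let indice0 := i % n
      let indice2 := (i + 2) % n
      let indice4 := (i + 4) % n
      (st.1.set i (lista.getD indice0 0 + lista.getD indice2 0 - lista.getD indice4 0), i + 1))
    (List.replicate n 0, 0))).1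

-- ===== PORT B =====
-- rot2 = lista[s2:] + lista[:s2] with s2 = 2 % n (exact: Python slices with 0 ≤ s ≤ n are drop/take),
-- then one aligned zip of the three sequences.
def Operar_For_i_alt (lista : List Int) : List Int :=
  let n := lista.length
  let s2 := 2 % n
  let s4 := 4 % n
  let rot2 := lista.drop s2 ++ lista.take s2
  let rot4 := lista.drop s4 ++ lista.take s4
  List.zipWith (fun a bc => a + bc.1 - bc.2) lista (rot2.zip rot4)

-- ===== PRECONDITION & SPEC =====
-- Pre_ excludes the empty list, on which A returns the string "Error" — not a value of type List Int.
def Pre_Operar_For_i (lista : List Int) : Prop := lista ≠ []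
instance (lista : List Int) : Decidable (Pre_Operar_For_i lista) := by unfold Pre_Operar_For_i; infer_instance
def pvWitness_Operar_For_i : List Int := [3, -1, 4, 1, 5]
def Spec_Operar_For_i (lista : List Int) (out : List Int) : Prop := out = Operar_For_i_alt lista
instance (lista : List Int) (out : List Int) : Decidable (Spec_Operar_For_i lista out) := by unfold Spec_Operar_For_i; infer_instance

-- ===== CLAIM (what is proved, stated in full; the proofs are below) =====
def Claim_equal_Operar_For_i : Prop := ∀ (lista : List Int), Dom_Operar_For_i lista → Pre_Operar_For_i lista → Spec_Operar_For_i lista (Operar_For_i lista)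

-- ===== LEMMAS AND PROOFS =====

-- the common per-index value
def pvF (lista : List Int) (i : Nat) : Int :=
  let n := lista.length
  lista.getD (i % n) 0 + lista.getD ((i + 2) % n) 0 - lista.getD ((i + 4) % n) 0

-- characterisation of A's fold: it only uses the counter, and sets positions i, i+1, …
theorem foldA_char (lista : List Int) (ys : List Int) (res : List Int) (i : Nat)
    (hlen : res.length = lista.length) :
    (ys.foldl (fun (st : List Int × Nat) _x =>
      (st.1.set st.2 (lista.getD (st.2 % lista.length) 0 + lista.getD ((st.2 + 2) % lista.length) 0
          - lista.getD ((st.2 + 4) % lista.length) 0), st.2 + 1)) (res, i)).1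
    = res.mapIdx (fun j v => if i ≤ j ∧ j < i + ys.length then pvF lista j else v) := by
  induction ys generalizing res i with
  | nil =>
    simp only [List.foldl_nil]
    apply List.ext_getElem (by simp)
    intro j h1 h2
    simp
  | cons y ys ih =>
    simp only [List.foldl_cons]
    rw [ih _ _ (by simp [hlen])]
    apply List.ext_getElem (by simp)
    intro j h1 h2
    simp only [List.getElem_mapIdx, List.getElem_set]
    split_ifs <;> simp_all [pvF, List.getD_eq_getElem?_getD] <;> omega

theorem rot_getElem (lista : List Int) (k j : Nat) (hne : lista ≠ [])
    (hj : j < lista.length) :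
    (lista.drop (k % lista.length) ++ lista.take (k % lista.length)).getD j 0
      = lista.getD ((j + k) % lista.length) 0 := by
  have hn : 0 < lista.length := List.length_pos_iff.mpr hne
  have hrot : lista.drop (k % lista.length) ++ lista.take (k % lista.length) = lista.rotate k := by
    rw [List.rotate_eq_drop_append_take_mod]
  rw [hrot]
  have hlen : j < (lista.rotate k).length := by simpa using hj
  rw [List.getD_eq_getElem _ _ hlen, List.getElem_rotate]
  rw [List.getD_eq_getElem _ _ (by exact Nat.mod_lt _ hn)]

-- ===== VERDICT (by name: the statement is the Claim_ definition above) =====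
theorem Operar_For_i_spec : Claim_equal_Operar_For_i := by
  intro lista _hdom hpre
  unfold Spec_Operar_For_i Operar_For_i Operar_For_i_alt
  have hn : 0 < lista.length := List.length_pos_iff.mpr hpre
  rw [foldA_char lista lista (List.replicate lista.length 0) 0 (by simp)]
  apply List.ext_getElem
  · simp only [List.length_mapIdx, List.length_replicate, List.length_zipWith,
      List.length_zip, List.length_append, List.length_drop, List.length_take]
    omega
  · intro j h1 h2
    have hj : j < lista.length := by simpa using h1
    simp only [List.getElem_mapIdx, List.getElem_replicate, List.getElem_zipWith,
      List.getElem_zip]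
    have : 0 ≤ j ∧ j < 0 + lista.length := by omega
    simp only [this, pvF]
    have r2 := rot_getElem lista 2 j hpre hj
    have r4 := rot_getElem lista 4 j hpre hj
    simp only [List.getD_eq_getElem?_getD] at r2 r4 ⊢
    have hj2 : j < (lista.drop (2 % lista.length) ++ lista.take (2 % lista.length)).length := by
      rw [List.length_append, List.length_drop, List.length_take]; omega
    have hj4 : j < (lista.drop (4 % lista.length) ++ lista.take (4 % lista.length)).length := by
      rw [List.length_append, List.length_drop, List.length_take]; omega
    rw [List.getElem?_eq_getElem hj2] at r2
    rw [List.getElem?_eq_getElem hj4] at r4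
    simp only [Option.getD_some] at r2 r4
    rw [← r2, ← r4]
    have hjm : j % lista.length = j := Nat.mod_eq_of_lt hj
    simp [hjm, List.getElem?_eq_getElem hj]
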